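-- pv_equiv track=rewrite | github.com/CryptoPilot16/CryptoPilot16 | scripts/update_readme.py | compact_project_name
-- ===== SOURCE A (Python) =====
-- MAX_PROJECT_NAME_LEN = 16
--
-- DISPLAY_NAME_OVERRIDES = {
--     "smartmoney-radar": "smartmoney",
--     "govdeals-platform": "govdeals",
-- }
--
-- def compact_project_name(repo_name, max_len=MAX_PROJECT_NAME_LEN):
--     """Return a short display name for README while preserving repo identity separately."""
--     name = DISPLAY_NAME_OVERRIDES.get(repo_name, repo_name)
--     if len(name) <= max_len:
--         return name
--
--     # Prefer whole '-' segments when possible.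
--     if "-" in name:
--         parts = name.split("-")
--         chosen = []
--         for part in parts:
--             candidate = "-".join(chosen + [part])
--             if len(candidate) <= max_len:
--                 chosen.append(part)
--             else:
--                 break
--         if chosen:
--             candidate = "-".join(chosen)
--             if len(candidate) <= max_len:
--                 return candidate
--
--     # Hard truncate as fallback.
--     if max_len <= 3:
--         return name[:max_len]
--     return name[: max_len - 3] + "..."
-- ===== SOURCE B (Python) =====
-- MAX_PROJECT_NAME_LEN = 16
--
-- DISPLAY_NAME_OVERRIDES = {
--     "smartmoney-radar": "smartmoney",
--     "govdeals-platform": "govdeals",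
-- }
--
-- def compact_project_name(repo_name, max_len=MAX_PROJECT_NAME_LEN):
--     """Return a short display name for README while preserving repo identity separately."""
--     name = DISPLAY_NAME_OVERRIDES.get(repo_name, repo_name)
--     if len(name) <= max_len:
--         return name
--
--     # Longest whole-'-'-segment prefix that fits = cut at the last '-' at index <= max_len.
--     cut = name.rfind("-", 0, max(max_len + 1, 0))
--     if cut >= 0:
--         return name[:cut]
--
--     # Hard truncate as fallback.
--     if max_len <= 3:
--         return name[:max_len]
--     return name[: max_len - 3] + "..."
-- ===== Notes on version B (the rewrite author's own statement) =====
-- stated objective: simpler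
-- what changed: The split('-') + greedy rejoin loop (building ever longer '-'-joined prefixes until one exceeds max_len) is replaced by a single rfind of the last '-' at index <= max_len, cutting the name there; the override lookup, the short-name early return and the hard-truncate fallback are unchanged.
import Mathlib
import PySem

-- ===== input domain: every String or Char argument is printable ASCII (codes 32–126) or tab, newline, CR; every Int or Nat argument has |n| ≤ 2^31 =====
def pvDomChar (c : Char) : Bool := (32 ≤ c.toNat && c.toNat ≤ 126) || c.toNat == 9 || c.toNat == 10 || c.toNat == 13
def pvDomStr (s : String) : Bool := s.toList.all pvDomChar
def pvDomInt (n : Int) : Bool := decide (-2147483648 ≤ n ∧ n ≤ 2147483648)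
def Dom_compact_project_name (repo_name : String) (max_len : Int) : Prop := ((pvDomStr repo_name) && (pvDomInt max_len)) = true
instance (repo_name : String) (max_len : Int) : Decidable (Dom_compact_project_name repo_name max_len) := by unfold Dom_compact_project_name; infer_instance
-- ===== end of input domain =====

-- B replaces A's split('-') + greedy rejoin loop with a single rfind of the last '-' at index ≤ max_len (simpler; same result).

-- ===== PORT A =====
-- DISPLAY_NAME_OVERRIDES
def pvOverridesA : PySem.Dict String String :=
  PySem.Dict.ofList [("smartmoney-radar", "smartmoney"), ("govdeals-platform", "govdeals")]

-- the 'for part in parts: … else: break' greedy loop, state = chosen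
def pvALoop (max_len : Int) : List (List Char) → List (List Char) → List (List Char)
  | [], chosen => chosen
  | p :: rest, chosen =>
      let candidate := PySem.Chars.join ['-'] (chosen ++ [p])
      if PySem.Chars.len candidate ≤ max_len then pvALoop max_len rest (chosen ++ [p]) else chosen

-- the common 'hard truncate' tail of A
def pvHardTruncA (cs : List Char) (max_len : Int) : String :=
  if max_len ≤ 3 then String.ofList (PySem.Chars.slice cs none (some max_len))
  else String.ofList (PySem.Chars.slice cs none (some (max_len - 3)) ++ ['.', '.', '.'])

def compact_project_name (repo_name : String) (max_len : Int) : String :=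
  let name := pvOverridesA.getD repo_name repo_name
  let cs := name.toList
  if PySem.Chars.len cs ≤ max_len then name
  else
    if PySem.Chars.isIn ['-'] cs then
      let parts := PySem.Chars.splitOn cs ['-']
      let chosen := pvALoop max_len parts []
      if chosen ≠ [] then
        let candidate := PySem.Chars.join ['-'] chosen
        if PySem.Chars.len candidate ≤ max_len then String.ofList candidate
        else pvHardTruncA cs max_len
      else pvHardTruncA cs max_len
    else pvHardTruncA cs max_len

-- ===== PORT B =====
def pvOverridesB : PySem.Dict String String :=
  PySem.Dict.ofList [("smartmoney-radar", "smartmoney"), ("govdeals-platform", "govdeals")]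

-- the common 'hard truncate' tail of B (same Python text as A's tail)
def pvHardTruncB (cs : List Char) (max_len : Int) : String :=
  if max_len ≤ 3 then String.ofList (PySem.Chars.slice cs none (some max_len))
  else String.ofList (PySem.Chars.slice cs none (some (max_len - 3)) ++ ['.', '.', '.'])

def compact_project_name_alt (repo_name : String) (max_len : Int) : String :=
  let name := pvOverridesB.getD repo_name repo_name
  let cs := name.toList
  if PySem.Chars.len cs ≤ max_len then name
  else
    let cut := PySem.Chars.rfindFrom cs ['-'] 0 (some (max (max_len + 1) 0))
    if 0 ≤ cut then String.ofList (PySem.Chars.slice cs none (some cut))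
    else pvHardTruncB cs max_len

-- ===== PRECONDITION & SPEC =====
def Spec_compact_project_name (repo_name : String) (max_len : Int) (out : String) : Prop := out = compact_project_name_alt repo_name max_len
instance (repo_name : String) (max_len : Int) (out : String) : Decidable (Spec_compact_project_name repo_name max_len out) := by unfold Spec_compact_project_name; infer_instance

-- ===== CLAIM (what is proved, stated in full; the proofs are below) =====
def Claim_equal_compact_project_name : Prop := ∀ (repo_name : String) (max_len : Int), Dom_compact_project_name repo_name max_len → Spec_compact_project_name repo_name max_len (compact_project_name repo_name max_len)

-- ===== LEMMAS AND PROOFS =====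

-- reference: a list-structural rendering of split-on-'-'
def pvMySplit : List Char → List (List Char)
  | [] => [[]]
  | c :: t =>
      if c = '-' then [] :: pvMySplit t
      else match pvMySplit t with
        | [] => [[c]]
        | h :: r => (c :: h) :: r

-- reference: index of the LAST '-' in a list (-1 if none)
def pvLH : List Char → Int
  | [] => -1
  | c :: t => if pvLH t = -1 then (if c = '-' then (0 : Int) else -1) else pvLH t + 1

-- reference: A's loop carried on the joined candidate instead of the chosen list
def pvLoopJ (max_len : Int) : List (List Char) → Option (List Char) → Option (List Char)
  | [], acc => acc
  | p :: ps, acc =>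
      let cand := match acc with | none => p | some c => c ++ '-' :: p
      if (cand.length : Int) ≤ max_len then pvLoopJ max_len ps (some cand) else acc

def pvOptJoin (l : List (List Char)) : Option (List Char) :=
  if l = [] then none else some (PySem.Chars.join ['-'] l)

-- the effective prefix bound both programs look inside
def pvB (n : Nat) (max_len : Int) : Nat := min n (max (max_len + 1) 0).toNat

theorem pvLH_nil : pvLH [] = -1 := rfl

theorem pvLH_cons (c : Char) (t : List Char) :
    pvLH (c :: t) = if pvLH t = -1 then (if c = '-' then (0 : Int) else -1) else pvLH t + 1 := rfl

theorem pvLH_singleton (x : Char) : pvLH [x] = if x = '-' then (0 : Int) else -1 := by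
  rw [pvLH_cons, if_pos pvLH_nil]

theorem pvLH_bounds (s : List Char) : -1 ≤ pvLH s ∧ pvLH s < s.length := by
  induction s with
  | nil => simp [pvLH]
  | cons c t ih =>
      obtain ⟨ih1, ih2⟩ := ih
      simp only [pvLH, List.length_cons]
      split_ifs <;> constructor <;> push_cast <;> omega

theorem pvLH_eq_neg_one_iff (s : List Char) : pvLH s = -1 ↔ '-' ∉ s := by
  induction s with
  | nil => simp [pvLH]
  | cons c t ih =>
      obtain ⟨hb1, hb2⟩ := pvLH_bounds t
      simp only [pvLH, List.mem_cons]
      split_ifs with h1 h2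
      · simp [h2]
      · simp [ih.mp h1]
        intro hh; exact h2 hh.symm
      · constructor
        · intro h; omega
        · intro h
          exact absurd (ih.mpr (fun hm => h (Or.inr hm))) h1

theorem pvLH_append (xs ys : List Char) :
    pvLH (xs ++ ys) = if pvLH ys = -1 then pvLH xs else xs.length + pvLH ys := by
  induction xs with
  | nil => simp only [List.nil_append, List.length_nil]; split_ifs with h <;> simp [pvLH, h]
  | cons x t ih =>
      obtain ⟨ha1, ha2⟩ := pvLH_bounds ys
      obtain ⟨hb1, hb2⟩ := pvLH_bounds (t ++ ys)
      obtain ⟨hc1, hc2⟩ := pvLH_bounds t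
      simp only [List.cons_append, pvLH, ih, List.length_cons]
      split_ifs <;> push_cast <;> omega

theorem pvLH_hyphen_mid (pre p rest : List Char) (hp : '-' ∉ p) :
    pvLH (pre ++ '-' :: (p ++ rest)) = if pvLH rest = -1 then (pre.length : Int) else (pre.length + 1 + p.length : Int) + pvLH rest := by
  have h1 : pvLH (p ++ rest) = if pvLH rest = -1 then pvLH p else (p.length : Int) + pvLH rest := pvLH_append p rest
  have hp' : pvLH p = -1 := (pvLH_eq_neg_one_iff p).mpr hp
  have hb := pvLH_bounds rest
  obtain ⟨hd1, hd2⟩ := pvLH_bounds pre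
  obtain ⟨hb1, hb2⟩ := pvLH_bounds rest
  by_cases hr : pvLH rest = -1
  · have e1 : pvLH (p ++ rest) = -1 := by rw [h1]; simp [hr, hp']
    have e2 : pvLH ('-' :: (p ++ rest)) = 0 := by simp [pvLH, e1]
    rw [pvLH_append pre ('-' :: (p ++ rest)), e2]
    simp [hr]
  · have e1 : pvLH (p ++ rest) = (p.length : Int) + pvLH rest := by rw [h1]; simp [hr]
    have e2 : pvLH ('-' :: (p ++ rest)) = (p.length : Int) + pvLH rest + 1 := by
      simp only [pvLH, e1]; split_ifs with h <;> omega
    rw [pvLH_append pre ('-' :: (p ++ rest)), e2]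
    split_ifs with h <;> omega

-- splitOn is pvMySplit (sep = "-")
theorem pvMySplit_ne_nil (cs : List Char) : pvMySplit cs ≠ [] := by
  cases cs with
  | nil => simp [pvMySplit]
  | cons c t => simp only [pvMySplit]; split_ifs <;> [skip; cases pvMySplit t] <;> simp

theorem pvSplitOn_go_zero (l cur : List Char) (acc : List (List Char)) :
    PySem.Chars.splitOn.go ['-'] 0 l cur acc = ((cur.reverse ++ l) :: acc).reverse := by
  simp [PySem.Chars.splitOn.go]

theorem pvSplitOn_go_nil (fuel : Nat) (cur : List Char) (acc : List (List Char)) :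
    PySem.Chars.splitOn.go ['-'] (fuel + 1) [] cur acc = (cur.reverse :: acc).reverse := by
  simp [PySem.Chars.splitOn.go]

theorem pvSplitOn_go_cons (fuel : Nat) (c : Char) (rest cur : List Char) (acc : List (List Char)) :
    PySem.Chars.splitOn.go ['-'] (fuel + 1) (c :: rest) cur acc =
      if c = '-' then PySem.Chars.splitOn.go ['-'] fuel rest [] (cur.reverse :: acc)
      else PySem.Chars.splitOn.go ['-'] fuel rest (c :: cur) acc := by
  rw [PySem.Chars.splitOn.go]
  by_cases h : c = '-' <;> simp [List.isPrefixOf, h]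
  intro h'
  exact absurd h'.symm h

theorem pvSplitOn_go (fuel : Nat) : ∀ (l cur : List Char) (acc : List (List Char)), l.length ≤ fuel →
    PySem.Chars.splitOn.go ['-'] fuel l cur acc =
      acc.reverse ++ (match pvMySplit l with
        | [] => [cur.reverse]
        | h :: r => (cur.reverse ++ h) :: r) := by
  induction fuel with
  | zero =>
      intro l cur acc hl
      have : l = [] := List.length_eq_zero_iff.mp (Nat.le_zero.mp hl)
      subst this
      simp [pvSplitOn_go_zero, pvMySplit]
  | succ fuel ih =>
      intro l cur acc hl
      cases l with
      | nil => simp [pvSplitOn_go_nil, pvMySplit]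
      | cons c rest =>
          rw [pvSplitOn_go_cons]
          simp only [List.length_cons] at hl
          split_ifs with h
          · rw [ih rest [] (cur.reverse :: acc) (by omega)]
            cases hms : pvMySplit rest with
            | nil => exact absurd hms (pvMySplit_ne_nil rest)
            | cons hd tl => simp [pvMySplit, h, hms]
          · rw [ih rest (c :: cur) acc (by omega)]
            cases hms : pvMySplit rest with
            | nil => exact absurd hms (pvMySplit_ne_nil rest)
            | cons hd tl => simp [pvMySplit, h, hms]

theorem pvSplitOn_eq (cs : List Char) : PySem.Chars.splitOn cs ['-'] = pvMySplit cs := by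
  have h := pvSplitOn_go (cs.length + 1) cs [] [] (by omega)
  cases hms : pvMySplit cs with
  | nil => exact absurd hms (pvMySplit_ne_nil cs)
  | cons hd tl =>
      rw [hms] at h
      simpa [PySem.Chars.splitOn] using h

theorem pvMySplit_no_hyphen (cs : List Char) : ∀ p ∈ pvMySplit cs, '-' ∉ p := by
  induction cs with
  | nil => simp [pvMySplit]
  | cons c t ih =>
      simp only [pvMySplit]
      split_ifs with h
      · intro p hp
        rcases List.mem_cons.mp hp with hp | hp
        · simp [hp]
        · exact ih p hp
      · cases hms : pvMySplit t with
        | nil => exact absurd hms (pvMySplit_ne_nil t)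
        | cons hd tl =>
            intro p hp
            rcases List.mem_cons.mp hp with hp | hp
            · subst hp
              have hhd := ih hd (by simp [hms])
              intro hmem
              rcases List.mem_cons.mp hmem with h' | h'
              · exact h h'.symm
              · exact hhd h'
            · exact ih p (by simp [hms, hp])

theorem pvJoin_cons (p : List Char) (ps : List (List Char)) (h : ps ≠ []) :
    PySem.Chars.join ['-'] (p :: ps) = p ++ '-' :: PySem.Chars.join ['-'] ps := by
  cases ps with
  | nil => simp at h
  | cons q r => simp [PySem.Chars.join, List.intercalate, List.intersperse]

theorem pvJoin_mySplit (cs : List Char) : PySem.Chars.join ['-'] (pvMySplit cs) = cs := by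
  induction cs with
  | nil => simp [pvMySplit, PySem.Chars.join, List.intercalate]
  | cons c t ih =>
      simp only [pvMySplit]
      split_ifs with h
      · rw [pvJoin_cons [] (pvMySplit t) (pvMySplit_ne_nil t), ih]; simp [h]
      · cases hms : pvMySplit t with
        | nil => exact absurd hms (pvMySplit_ne_nil t)
        | cons hd tl =>
            rw [hms] at ih
            cases tl with
            | nil => simp_all [PySem.Chars.join, List.intercalate]
            | cons q r =>
                rw [pvJoin_cons (c :: hd) (q :: r) (by simp)]
                rw [pvJoin_cons hd (q :: r) (by simp)] at ih
                simp_all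

theorem pvMySplit_two_of_hyphen (cs : List Char) (h : '-' ∈ cs) :
    ∃ p0 rest, pvMySplit cs = p0 :: rest ∧ rest ≠ [] := by
  induction cs with
  | nil => simp at h
  | cons c t ih =>
      by_cases hc : c = '-'
      · exact ⟨[], pvMySplit t, by simp [pvMySplit, hc], pvMySplit_ne_nil t⟩
      · have ht : '-' ∈ t := by
          rcases List.mem_cons.mp h with h' | h'
          · exact absurd h'.symm hc
          · exact h'
        obtain ⟨p0, rest, hms, hr⟩ := ih ht
        exact ⟨c :: p0, rest, by simp [pvMySplit, hc, hms], hr⟩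

-- join of l ++ [p]
theorem pvJoin_snoc (l : List (List Char)) (p : List Char) :
    PySem.Chars.join ['-'] (l ++ [p]) = if l = [] then p else PySem.Chars.join ['-'] l ++ '-' :: p := by
  induction l with
  | nil => simp [PySem.Chars.join, List.intercalate]
  | cons x t ih =>
      rw [List.cons_append, pvJoin_cons x (t ++ [p]) (by simp)]
      cases t with
      | nil => simp_all [PySem.Chars.join, List.intercalate]
      | cons q r =>
          rw [ih]
          rw [pvJoin_cons x (q :: r) (by simp)]
          simp

-- A's loop tracked on the joined value
theorem pvOptJoin_ne (ps : List (List Char)) (h : ps ≠ []) :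
    pvOptJoin ps = some (PySem.Chars.join ['-'] ps) := by simp [pvOptJoin, h]

theorem pvLoopJ_cons_none (ml : Int) (p : List Char) (ps : List (List Char)) :
    pvLoopJ ml (p :: ps) none = if (p.length : Int) ≤ ml then pvLoopJ ml ps (some p) else none := rfl

theorem pvLoopJ_cons_some (ml : Int) (p c : List Char) (ps : List (List Char)) :
    pvLoopJ ml (p :: ps) (some c) =
      if ((c ++ '-' :: p).length : Int) ≤ ml then pvLoopJ ml ps (some (c ++ '-' :: p)) else some c := rfl

theorem pvALoop_cons (ml : Int) (p : List Char) (rest chosen : List (List Char)) :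
    pvALoop ml (p :: rest) chosen =
      if PySem.Chars.len (PySem.Chars.join ['-'] (chosen ++ [p])) ≤ ml then pvALoop ml rest (chosen ++ [p]) else chosen := rfl

theorem pvALoop_to_loopJ (ml : Int) : ∀ (ps chosen : List (List Char)),
    pvOptJoin (pvALoop ml ps chosen) = pvLoopJ ml ps (pvOptJoin chosen) := by
  intro ps
  induction ps with
  | nil => intro chosen; simp [pvALoop, pvLoopJ]
  | cons p rest ih =>
      intro chosen
      by_cases hc : chosen = []
      · subst hc
        have hj : PySem.Chars.join ['-'] (([] : List (List Char)) ++ [p]) = p := by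
          simp [PySem.Chars.join, List.intercalate]
        have hO : pvOptJoin ([] : List (List Char)) = none := by simp [pvOptJoin]
        rw [hO, pvALoop_cons, pvLoopJ_cons_none, hj, PySem.Chars.len_eq]
        split_ifs with hlen
        · rw [ih]
          rw [pvOptJoin_ne ([] ++ [p]) (by simp), hj]
        · exact hO
      · have hj : PySem.Chars.join ['-'] (chosen ++ [p]) =
            PySem.Chars.join ['-'] chosen ++ '-' :: p := by rw [pvJoin_snoc]; simp [hc]
        rw [pvOptJoin_ne chosen hc, pvALoop_cons, pvLoopJ_cons_some, hj, PySem.Chars.len_eq]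
        split_ifs with hlen
        · rw [ih, pvOptJoin_ne (chosen ++ [p]) (by simp), hj]
        · exact pvOptJoin_ne chosen hc

theorem pvLH_take_mid (pre p rest : List Char) (b : Nat) (hp : '-' ∉ p)
    (h1 : pre.length < b) (h2 : b ≤ pre.length + 1 + p.length) :
    pvLH (List.take b (pre ++ '-' :: (p ++ rest))) = (pre.length : Int) := by
  have e1 : List.take b (pre ++ '-' :: (p ++ rest)) = pre ++ '-' :: List.take (b - pre.length - 1) p := by
    rw [List.take_append, List.take_of_length_le (by omega)]
    congr 1
    have hb' : b - pre.length = (b - pre.length - 1) + 1 := by omega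
    rw [hb', List.take_succ_cons]
    congr 1
    exact List.take_append_of_le_length (by omega)
  have hmm : '-' ∉ List.take (b - pre.length - 1) p := fun hm => hp (List.mem_of_mem_take hm)
  have h := pvLH_hyphen_mid pre (List.take (b - pre.length - 1) p) [] hmm
  rw [e1]
  simpa [pvLH] using h

-- the main characterisation of A's accepted loop
theorem pvLoopJ_some (ml : Int) : ∀ (ps : List (List Char)) (pre : List Char), ps ≠ [] →
    (∀ p ∈ ps, '-' ∉ p) → (pre.length : Int) ≤ ml →
    (ml : Int) < ((pre ++ '-' :: PySem.Chars.join ['-'] ps).length : Int) →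
    pvLoopJ ml ps (some pre) =
      some (List.take (pvLH (List.take (pvB (pre ++ '-' :: PySem.Chars.join ['-'] ps).length ml) (pre ++ '-' :: PySem.Chars.join ['-'] ps))).toNat (pre ++ '-' :: PySem.Chars.join ['-'] ps)) ∧
    0 ≤ pvLH (List.take (pvB (pre ++ '-' :: PySem.Chars.join ['-'] ps).length ml) (pre ++ '-' :: PySem.Chars.join ['-'] ps)) := by
  intro ps
  induction ps with
  | nil => intro pre h; exact absurd rfl h
  | cons p ps' ih =>
      intro pre _ hnh hpre hml
      have hpne : '-' ∉ p := hnh p (by simp)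
      cases ps' with
      | nil =>
          have hj : PySem.Chars.join ['-'] [p] = p := by simp [PySem.Chars.join, List.intercalate]
          rw [hj] at hml ⊢
          have hlen : (pre ++ '-' :: p).length = pre.length + 1 + p.length := by simp; omega
          rw [pvLoopJ_cons_some]
          have hfit : ¬ (((pre ++ '-' :: p).length : Int) ≤ ml) := by omega
          rw [if_neg hfit]
          have hb1 : pre.length < pvB (pre ++ '-' :: p).length ml := by unfold pvB; omega
          have hb2 : pvB (pre ++ '-' :: p).length ml ≤ pre.length + 1 + p.length := by unfold pvB; omega
          have hm : pvLH (List.take (pvB (pre ++ '-' :: p).length ml) (pre ++ '-' :: p)) = (pre.length : Int) := by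
            have h := pvLH_take_mid pre p [] (pvB (pre ++ '-' :: p).length ml) hpne hb1 hb2
            simpa using h
          refine ⟨?_, by omega⟩
          rw [hm, Int.toNat_natCast, List.take_left]
      | cons q r =>
          have hq : PySem.Chars.join ['-'] (p :: q :: r) = p ++ '-' :: PySem.Chars.join ['-'] (q :: r) :=
            pvJoin_cons p (q :: r) (by simp)
          rw [pvLoopJ_cons_some]
          by_cases hfit : (((pre ++ '-' :: p).length : Int) ≤ ml)
          · rw [if_pos hfit]
            have hassoc : (pre ++ '-' :: p) ++ '-' :: PySem.Chars.join ['-'] (q :: r) =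
                pre ++ '-' :: PySem.Chars.join ['-'] (p :: q :: r) := by rw [hq]; simp
            have h := ih (pre ++ '-' :: p) (by simp) (fun x hx => hnh x (by simp [hx])) hfit
              (by rw [hassoc]; exact hml)
            rw [hassoc] at h
            exact h
          · rw [if_neg hfit]
            have hform : pre ++ '-' :: PySem.Chars.join ['-'] (p :: q :: r) =
                pre ++ '-' :: (p ++ '-' :: PySem.Chars.join ['-'] (q :: r)) := by rw [hq]
            rw [hform] at hml ⊢
            have hlen : (pre ++ '-' :: (p ++ '-' :: PySem.Chars.join ['-'] (q :: r))).length =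
                pre.length + 1 + p.length + 1 + (PySem.Chars.join ['-'] (q :: r)).length := by simp; omega
            have hfit' : ¬ (((pre.length + 1 + p.length : Nat) : Int) ≤ ml) := by
              simp only [List.length_append, List.length_cons] at hfit
              push_cast at hfit ⊢
              omega
            have hb1 : pre.length < pvB (pre ++ '-' :: (p ++ '-' :: PySem.Chars.join ['-'] (q :: r))).length ml := by
              unfold pvB; omega
            have hb2 : pvB (pre ++ '-' :: (p ++ '-' :: PySem.Chars.join ['-'] (q :: r))).length ml ≤ pre.length + 1 + p.length := by
              unfold pvB; push_cast at hfit'; omega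
            have hm := pvLH_take_mid pre p ('-' :: PySem.Chars.join ['-'] (q :: r)) _ hpne hb1 hb2
            refine ⟨?_, by omega⟩
            rw [hm, Int.toNat_natCast, List.take_left]

theorem pvRfind_go_zero (cs : List Char) :
    PySem.Chars.rfind.go cs ['-'] 0 = if ['-'].isPrefixOf cs then (0 : Int) else -1 := by
  rw [PySem.Chars.rfind.go]

theorem pvRfind_go_succ (cs : List Char) (j : Nat) :
    PySem.Chars.rfind.go cs ['-'] (j + 1) =
      if ['-'].isPrefixOf (cs.drop (j + 1)) then ((j : Int) + 1) else PySem.Chars.rfind.go cs ['-'] j := by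
  rw [PySem.Chars.rfind.go]
  push_cast
  rfl

theorem pvRfind_go (cs : List Char) : ∀ j : Nat, j ≤ cs.length →
    PySem.Chars.rfind.go cs ['-'] j = pvLH (List.take (j + 1) cs) := by
  intro j
  induction j with
  | zero =>
      intro _
      rw [pvRfind_go_zero]
      cases cs with
      | nil => simp [pvLH]
      | cons c t =>
          by_cases h : c = '-' <;> simp [List.isPrefixOf, h, pvLH]
          exact fun h' => h h'.symm
  | succ j ih =>
      intro hj
      rw [pvRfind_go_succ]
      by_cases hlt : j + 1 < cs.length
      · have hdrop : cs.drop (j + 1) = cs[j + 1] :: cs.drop (j + 2) := List.drop_eq_getElem_cons hlt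
        have htake : List.take (j + 2) cs = List.take (j + 1) cs ++ [cs[j + 1]] := by
          rw [List.take_add_one, List.getElem?_eq_getElem hlt]
          rfl
        have happ := pvLH_append (List.take (j + 1) cs) [cs[j + 1]]
        have hlen : (List.take (j + 1) cs).length = j + 1 := by
          simp [List.length_take]; omega
        by_cases hc : cs[j + 1] = '-'
        · rw [if_pos (by rw [hdrop]; simp [List.isPrefixOf, hc])]
          rw [htake, happ]
          have h0 : pvLH [cs[j + 1]] = 0 := by rw [pvLH_singleton, if_pos hc]
          rw [h0, if_neg (by omega), hlen]
          push_cast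
          omega
        · rw [if_neg (by rw [hdrop]; simp [List.isPrefixOf]; exact fun h => hc h.symm)]
          rw [htake, happ, ih (by omega)]
          have h0 : pvLH [cs[j + 1]] = -1 := by rw [pvLH_singleton, if_neg hc]
          rw [h0, if_pos rfl]
      · have hge : j + 1 = cs.length := by omega
        rw [if_neg (by simp [hge])]
        rw [ih (by omega)]
        congr 1
        rw [List.take_of_length_le (by omega), List.take_of_length_le (by omega)]

theorem pvRfind_eq (cs : List Char) : PySem.Chars.rfind cs ['-'] = pvLH cs := by
  show PySem.Chars.rfind.go cs ['-'] cs.length = pvLH cs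
  cases cs with
  | nil => simp [pvRfind_go_zero, List.isPrefixOf, pvLH]
  | cons c t =>
      rw [show (c :: t).length = t.length + 1 from rfl, pvRfind_go_succ]
      rw [if_neg (by simp)]
      rw [pvRfind_go (c :: t) t.length (by simp)]
      congr 1
      exact List.take_of_length_le (by simp)

theorem pvRfindFrom_eq (cs : List Char) (ml : Int) :
    PySem.Chars.rfindFrom cs ['-'] 0 (some (max (ml + 1) 0)) =
      if pvLH (List.take (pvB cs.length ml) cs) = -1 then -1 else pvLH (List.take (pvB cs.length ml) cs) := by
  simp only [PySem.Chars.rfindFrom]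
  norm_num
  have hB : (if (cs.length : Int) ≤ ml ∨ (cs.length : Int) < 0 then (cs.length : Int) else max (ml + 1) 0).toNat = pvB cs.length ml := by
    unfold pvB
    split_ifs <;> omega
  rw [hB, pvRfind_eq, if_neg (by split_ifs <;> omega)]

theorem pvTrunc_eq : pvHardTruncA = pvHardTruncB := rfl

theorem pvIsIn_iff (cs : List Char) : PySem.Chars.isIn ['-'] cs = true ↔ '-' ∈ cs := by
  rw [PySem.Chars.isIn_iff_infix]
  exact List.singleton_infix_iff '-' cs

theorem pvBody_eq (nm : String) (ml : Int) :
    (if PySem.Chars.len nm.toList ≤ ml then nm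
     else
       if PySem.Chars.isIn ['-'] nm.toList then
         let parts := PySem.Chars.splitOn nm.toList ['-']
         let chosen := pvALoop ml parts []
         if chosen ≠ [] then
           let candidate := PySem.Chars.join ['-'] chosen
           if PySem.Chars.len candidate ≤ ml then String.ofList candidate
           else pvHardTruncA nm.toList ml
         else pvHardTruncA nm.toList ml
       else pvHardTruncA nm.toList ml) =
    (if PySem.Chars.len nm.toList ≤ ml then nm
     else
       let cut := PySem.Chars.rfindFrom nm.toList ['-'] 0 (some (max (ml + 1) 0))
       if 0 ≤ cut then String.ofList (PySem.Chars.slice nm.toList none (some cut))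
       else pvHardTruncB nm.toList ml) := by
  by_cases h0 : PySem.Chars.len nm.toList ≤ ml
  · rw [if_pos h0, if_pos h0]
  · rw [if_neg h0, if_neg h0]
    set cs := nm.toList with hcsdef
    have hml : (ml : Int) < cs.length := by
      rw [PySem.Chars.len_eq] at h0; omega
    simp only [pvRfindFrom_eq]
    by_cases hmem : '-' ∈ cs
    · rw [if_pos ((pvIsIn_iff cs).mpr hmem)]
      obtain ⟨p0, rest, hms, hrne⟩ := pvMySplit_two_of_hyphen cs hmem
      have hsplit : PySem.Chars.splitOn cs ['-'] = p0 :: rest := by rw [pvSplitOn_eq, hms]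
      have hjcs : cs = p0 ++ '-' :: PySem.Chars.join ['-'] rest := by
        conv_lhs => rw [← pvJoin_mySplit cs, hms, pvJoin_cons p0 rest hrne]
      have hp0 : '-' ∉ p0 := pvMySplit_no_hyphen cs p0 (by rw [hms]; simp)
      have hLoop := pvALoop_to_loopJ ml (p0 :: rest) []
      have hO : pvOptJoin ([] : List (List Char)) = none := by simp [pvOptJoin]
      rw [hO, pvLoopJ_cons_none] at hLoop
      rw [hsplit]
      by_cases hp0len : (p0.length : Int) ≤ ml
      · rw [if_pos hp0len] at hLoop
        have hrest_nh : ∀ x ∈ rest, '-' ∉ x := fun x hx => pvMySplit_no_hyphen cs x (by rw [hms]; simp [hx])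
        have hml' : ml < (((p0 ++ '-' :: PySem.Chars.join ['-'] rest)).length : Int) := by
          rw [← hjcs]; exact hml
        obtain ⟨hLJ, hr0⟩ := pvLoopJ_some ml rest p0 hrne hrest_nh hp0len hml'
        rw [hLJ, ← hjcs] at hLoop
        rw [← hjcs] at hr0
        have hch : pvALoop ml (p0 :: rest) [] ≠ [] := by
          intro hE; rw [hE] at hLoop; simp [pvOptJoin] at hLoop
        have hchj : PySem.Chars.join ['-'] (pvALoop ml (p0 :: rest) []) =
            List.take (pvLH (List.take (pvB cs.length ml) cs)).toNat cs := by
          rw [pvOptJoin_ne _ hch] at hLoop; exact Option.some.inj hLoop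
        obtain ⟨hb1, hb2⟩ := pvLH_bounds (List.take (pvB cs.length ml) cs)
        have hbB : pvB cs.length ml ≤ cs.length ∧ (pvB cs.length ml : Int) ≤ ml + 1 := by
          constructor <;> (unfold pvB; omega)
        have hlt : (List.take (pvB cs.length ml) cs).length = pvB cs.length ml := by
          rw [List.length_take]; omega
        rw [hlt] at hb2
        have hrml : pvLH (List.take (pvB cs.length ml) cs) ≤ ml := by omega
        simp only [if_pos hch, hchj]
        have hlen2 : PySem.Chars.len (List.take (pvLH (List.take (pvB cs.length ml) cs)).toNat cs) =
            pvLH (List.take (pvB cs.length ml) cs) := by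
          rw [PySem.Chars.len_eq, List.length_take]; omega
        have hcut : (if pvLH (List.take (pvB cs.length ml) cs) = -1 then (-1 : Int)
            else pvLH (List.take (pvB cs.length ml) cs)) = pvLH (List.take (pvB cs.length ml) cs) := by
          rw [if_neg (by omega)]
        rw [hlen2, if_pos hrml, hcut, if_pos hr0]
        congr 1
        rw [PySem.Chars.slice_eq_listSlice, PySem.List.slice_to cs hr0]
      · rw [if_neg hp0len] at hLoop
        have hch0 : pvALoop ml (p0 :: rest) [] = [] := by
          by_contra hne
          rw [pvOptJoin_ne _ hne] at hLoop
          simp at hLoop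
        have hble : pvB cs.length ml ≤ p0.length := by unfold pvB; omega
        have htake : List.take (pvB cs.length ml) cs = List.take (pvB cs.length ml) p0 := by
          have h := List.take_append_of_le_length (l₂ := '-' :: PySem.Chars.join ['-'] rest) hble
          rw [← hjcs] at h
          exact h
        have hrneg : pvLH (List.take (pvB cs.length ml) cs) = -1 := by
          rw [htake]
          exact (pvLH_eq_neg_one_iff _).mpr (fun hm => hp0 (List.mem_of_mem_take hm))
        rw [if_neg (fun hh => hh hch0), hrneg, if_pos rfl, if_neg (by omega)]
        rw [pvTrunc_eq]
    · rw [if_neg (by simp [pvIsIn_iff, hmem])]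
      have hrneg : pvLH (List.take (pvB cs.length ml) cs) = -1 :=
        (pvLH_eq_neg_one_iff _).mpr (fun hm => hmem (List.mem_of_mem_take hm))
      rw [hrneg, if_pos rfl, if_neg (by omega)]
      rw [pvTrunc_eq]

-- ===== VERDICT (by name: the statement is the Claim_ definition above) =====
theorem compact_project_name_spec : Claim_equal_compact_project_name := by
  unfold Claim_equal_compact_project_name
  intro repo_name max_len _
  unfold Spec_compact_project_name compact_project_name compact_project_name_alt
  have hd : pvOverridesB = pvOverridesA := rfl
  rw [hd]
  exact pvBody_eq (pvOverridesA.getD repo_name repo_name) max_len
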